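-- pv_equiv track=rewrite | github.com/maneesh070/dsa | arrays/easy_array/second_order_elements/solution_3.py | getSecondOrderElements
-- ===== SOURCE A (Python) =====
-- def getSecondOrderElements(arr, n):
--     # Insertion sort
--     for i in range(n-1):
--         j = 0
--         while i-j>=0:
--             if arr[i-j]>arr[i-j+1]:
--                 arr[i-j], arr[i+1-j] = arr[i+1-j], arr[i-j]
--             j += 1
--
--     b = []
--     b.append(arr[-2])
--     b.append(arr[1])
--     return b
-- ===== SOURCE B (Python) =====
-- def getSecondOrderElements(arr, n):
--     # Same return value as A for 2 <= len(arr) and n <= len(arr); B does not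
--     # mutate arr (A sorts it in place -- equivalence is about the return value).
--     m = max(n, 0)
--     c = sorted(arr[:m]) + arr[m:]
--     return [c[-2], c[1]]
-- ===== Notes on version B (the rewrite author's own statement) =====
-- stated objective: faster
-- what changed: Replaces A's hand-written in-place O(n^2) insertion sort (nested index loops with pairwise swaps) by one Timsort call on the first max(n,0) elements spliced with the untouched tail, then picks the same two positions; B also leaves arr unmutated.
import Mathlib
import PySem

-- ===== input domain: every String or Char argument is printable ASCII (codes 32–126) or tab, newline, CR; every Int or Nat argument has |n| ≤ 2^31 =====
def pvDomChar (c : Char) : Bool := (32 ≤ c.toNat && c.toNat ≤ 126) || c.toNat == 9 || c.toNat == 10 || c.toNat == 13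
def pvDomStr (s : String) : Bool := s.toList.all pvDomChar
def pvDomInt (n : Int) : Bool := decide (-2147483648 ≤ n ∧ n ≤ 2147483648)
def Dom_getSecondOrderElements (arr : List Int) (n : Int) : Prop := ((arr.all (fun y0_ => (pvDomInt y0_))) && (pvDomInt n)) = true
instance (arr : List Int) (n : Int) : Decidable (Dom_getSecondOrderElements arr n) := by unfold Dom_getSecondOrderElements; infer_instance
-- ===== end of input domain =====

-- B replaces A's hand-written in-place O(n^2) insertion sort by one library-sort call on
-- the first max(n,0) elements spliced with the untouched tail (B does not mutate arr;
-- the equivalence proved is about the return value, which is all A's caller gets back).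

-- ===== PORT A =====
-- one body of A's inner while: compare arr[k] and arr[k+1], swap if out of order
-- (indices are in range under Pre_, where A raises no IndexError; getD's default is never used there)
def pvSwapStep (a : List Int) (k : Nat) : List Int :=
  let x := a.getD k 0
  let y := a.getD (k + 1) 0
  if x > y then (a.set k y).set (k + 1) x else a

-- A's inner 'while i-j>=0' loop: j = 0,1,…,i, i.e. compare-and-swap at k = i, i-1, …, 0
def pvDown : List Int → Nat → List Int
  | a, 0 => pvSwapStep a 0
  | a, k + 1 => pvDown (pvSwapStep a (k + 1)) k

def getSecondOrderElements (arr : List Int) (n : Int) : List Int :=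
  -- for i in range(n-1): inner while loop (i ≥ 0, so i.toNat is exact)
  let a := (PySem.List.pyRange 0 (n - 1) 1).foldl (fun acc i => pvDown acc i.toNat) arr
  -- b = [arr[-2], arr[1]]  (in range under Pre_)
  [PySem.List.pyGetD a (-2) 0, PySem.List.pyGetD a 1 0]

-- ===== PORT B =====
def getSecondOrderElements_alt (arr : List Int) (n : Int) : List Int :=
  let m := max n 0
  let c := PySem.List.sorted (PySem.List.slice arr none (some m)) (fun x => x) false
             ++ PySem.List.slice arr (some m) none
  [PySem.List.pyGetD c (-2) 0, PySem.List.pyGetD c 1 0]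

-- ===== PRECONDITION & SPEC =====
-- Pre_ is exactly where A returns: A raises IndexError when len(arr) < 2 (at arr[-2]/arr[1])
-- or when n > len(arr) (the sort loop reads arr[i+1] past the end).
def Pre_getSecondOrderElements (arr : List Int) (n : Int) : Prop :=
  2 ≤ arr.length ∧ n ≤ arr.length
instance (arr : List Int) (n : Int) : Decidable (Pre_getSecondOrderElements arr n) := by
  unfold Pre_getSecondOrderElements; infer_instance

def pvWitness_getSecondOrderElements : List Int × Int := ([3, 1, 2], 3)

def Spec_getSecondOrderElements (arr : List Int) (n : Int) (out : List Int) : Prop :=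
  out = getSecondOrderElements_alt arr n
instance (arr : List Int) (n : Int) (out : List Int) : Decidable (Spec_getSecondOrderElements arr n out) := by
  unfold Spec_getSecondOrderElements; infer_instance

-- ===== CLAIM (what is proved, stated in full; the proofs are below) =====
def Claim_equal_getSecondOrderElements : Prop :=
  ∀ (arr : List Int) (n : Int), Dom_getSecondOrderElements arr n →
    Pre_getSecondOrderElements arr n →
    Spec_getSecondOrderElements arr n (getSecondOrderElements arr n)

-- ===== LEMMAS AND PROOFS =====

lemma pvGetD_lt (a : List Int) (i : Nat) (d : Int) (h : i < a.length) : a.getD i d = a[i] := by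
  simp [List.getD, List.getElem?_eq_getElem h]

lemma pvGetD_append_len (pre : List Int) (c : Int) (rest : List Int) (d : Int) :
    (pre ++ c :: rest).getD pre.length d = c := by
  induction pre with
  | nil => rfl
  | cons h t ih => simp

lemma pvSet_append_len (pre : List Int) (c : Int) (rest : List Int) (v : Int) :
    (pre ++ c :: rest).set pre.length v = pre ++ v :: rest := by
  induction pre with
  | nil => rfl
  | cons h t ih => simp [ih]

-- the compare-and-swap at the boundary of a decomposed list
lemma pvSwapStep_mid (pre : List Int) (y x : Int) (r : List Int) :
    pvSwapStep (pre ++ y :: x :: r) pre.length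
      = if y > x then pre ++ x :: y :: r else pre ++ y :: x :: r := by
  have h2 : (pre ++ y :: x :: r).getD (pre.length + 1) 0 = x := by
    rw [show pre ++ y :: x :: r = (pre ++ [y]) ++ x :: r by simp,
        show pre.length + 1 = (pre ++ [y]).length by simp, pvGetD_append_len]
  simp only [pvSwapStep, pvGetD_append_len, h2]
  split_ifs with h
  · rw [pvSet_append_len,
        show pre ++ x :: x :: r = (pre ++ [x]) ++ x :: r by simp,
        show pre.length + 1 = (pre ++ [x]).length by simp, pvSet_append_len]
    simp
  · rfl

-- a pass of the inner loop over an already-sorted prefix does nothing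
lemma pvDown_noswap : ∀ (k : Nat) (a : List Int), k + 1 < a.length →
    (a.take (k + 2)).Pairwise (· ≤ ·) → pvDown a k = a := by
  intro k
  induction k with
  | zero =>
    intro a hlen hp
    match a, hlen with
    | x :: y :: rest, _ =>
      simp at hp
      simp [pvDown, pvSwapStep, List.getD]
      omega
  | succ k ih =>
    intro a hlen hp
    have hle : a[k + 1] ≤ a[k + 2] := by
      have := List.pairwise_iff_getElem.mp hp (k + 1) (k + 2)
        (by simp [List.length_take]; omega) (by simp [List.length_take]; omega) (by omega)
      simpa [List.getElem_take] using this
    have hle' : a[k + 1] ≤ a[k + 1 + 1] := hle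
    have hswap : pvSwapStep a (k + 1) = a := by
      rw [pvSwapStep]
      rw [pvGetD_lt a (k + 1) 0 (by omega), pvGetD_lt a (k + 1 + 1) 0 (by omega)]
      exact if_neg (by omega)
    have hTT : (a.take (k + 1 + 2)).take (k + 2) = a.take (k + 2) := by
      rw [List.take_take]; congr 1; omega
    have hsub : (a.take (k + 2)).Pairwise (· ≤ ·) :=
      hTT ▸ hp.sublist (List.take_sublist ..)
    simp only [pvDown]
    rw [hswap]
    exact ih a (by omega) hsub

-- the inner loop inserts the element just after a sorted prefix into it
lemma pvDown_bubble : ∀ (k : Nat) (s : List Int) (x : Int) (r : List Int),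
    s.length = k + 1 → s.Pairwise (· ≤ ·) →
    ∃ t : List Int, t.Perm (x :: s) ∧ t.Pairwise (· ≤ ·) ∧
      pvDown (s ++ x :: r) k = t ++ r := by
  intro k
  induction k with
  | zero =>
    intro s x r hlen hp
    obtain ⟨y, rfl⟩ := List.length_eq_one_iff.mp hlen
    by_cases h : y > x
    · refine ⟨[x, y], List.Perm.refl _, by simp; omega, ?_⟩
      simp [pvDown, pvSwapStep, List.getD, h]
    · refine ⟨[y, x], List.Perm.swap x y [], by simp; omega, ?_⟩
      simp [pvDown, pvSwapStep, List.getD, h]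
  | succ k ih =>
    intro s x r hlen hp
    rcases s.eq_nil_or_concat with rfl | ⟨s₁, y, rfl⟩
    · simp at hlen
    simp only [List.concat_eq_append] at hlen hp ⊢
    have hs₁ : s₁.length = k + 1 := by simpa using hlen
    have hkey : ((s₁ ++ [y]) ++ x :: r) = s₁ ++ y :: x :: r := by simp
    have hp₁ : s₁.Pairwise (· ≤ ·) := hp.sublist (by simp)
    have hley : ∀ a ∈ s₁, a ≤ y := by
      intro a ha
      exact (List.pairwise_append.mp hp).2.2 a ha y (by simp)
    have hstep : pvDown ((s₁ ++ [y]) ++ x :: r) (k + 1)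
        = pvDown (pvSwapStep (s₁ ++ y :: x :: r) s₁.length) k := by
      rw [hkey]
      simp only [pvDown]
      rw [hs₁]
    by_cases hgt : y > x
    · -- swap, then keep bubbling x down through s₁
      obtain ⟨t₁, hperm₁, hpw₁, heq₁⟩ := ih s₁ x (y :: r) hs₁ hp₁
      refine ⟨t₁ ++ [y], ?_, ?_, ?_⟩
      · have e : (x :: s₁) ++ [y] = x :: (s₁ ++ [y]) := by simp
        exact e ▸ hperm₁.append_right [y]
      · rw [List.pairwise_append]
        refine ⟨hpw₁, List.pairwise_singleton _ _, ?_⟩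
        intro a ha b hb
        simp at hb; subst hb
        rcases List.mem_cons.mp (hperm₁.mem_iff.mp ha) with rfl | h'
        · omega
        · exact hley a h'
      · rw [hstep, pvSwapStep_mid, if_pos hgt, heq₁]
        simp
    · -- already in place: the rest of the pass is a no-op over the sorted prefix
      have hdown : pvDown (s₁ ++ y :: x :: r) k = s₁ ++ y :: x :: r := by
        apply pvDown_noswap
        · simp; omega
        · have e : (s₁ ++ y :: x :: r).take (k + 2) = s₁ ++ [y] := by
            rw [show s₁ ++ y :: x :: r = (s₁ ++ [y]) ++ x :: r by simp,
                show k + 2 = (s₁ ++ [y]).length by simp [hs₁], List.take_left]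
          rw [e]; exact hp
      refine ⟨(s₁ ++ [y]) ++ [x], List.perm_append_singleton _ _, ?_, ?_⟩
      · rw [List.pairwise_append]
        refine ⟨hp, List.pairwise_singleton _ _, ?_⟩
        intro a ha b hb
        simp at hb; subst hb
        rcases List.mem_append.mp ha with h' | h'
        · exact le_trans (hley a h') (by omega)
        · simp at h'; omega
      · rw [hstep, pvSwapStep_mid, if_neg hgt, hdown]
        simp

-- the outer loop sorts the prefix of length k+1 and leaves the tail untouched
lemma pvOuter : ∀ (k : Nat) (arr : List Int), k + 1 ≤ arr.length →
    ∃ t : List Int, t.Perm (arr.take (k + 1)) ∧ t.Pairwise (· ≤ ·) ∧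
      (List.range k).foldl (fun acc i => pvDown acc i) arr = t ++ arr.drop (k + 1) := by
  intro k arr
  induction k with
  | zero =>
    intro hlen
    match arr, hlen with
    | x :: rest, _ => exact ⟨[x], by simp, by simp, by simp⟩
  | succ k ih =>
    intro hlen
    obtain ⟨t, hperm, hpw, heq⟩ := ih (by omega)
    have hkl : k + 1 < arr.length := by omega
    have htl : t.length = k + 1 := by
      rw [hperm.length_eq, List.length_take]; omega
    obtain ⟨t', hperm', hpw', heq'⟩ := pvDown_bubble k t arr[k + 1] (arr.drop (k + 2)) htl hpw
    refine ⟨t', ?_, hpw', ?_⟩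
    · have e : arr.take (k + 2) = arr.take (k + 1) ++ [arr[k + 1]] := by
        rw [List.take_add_one, List.getElem?_eq_getElem hkl]; rfl
      rw [e]
      exact hperm'.trans ((hperm.cons _).trans (List.perm_append_singleton _ _).symm)
    · rw [List.range_succ, List.foldl_append, heq]
      simp only [List.foldl_cons, List.foldl_nil]
      rw [List.drop_eq_getElem_cons hkl, heq']

-- the fold in A's port equals B's sorted-prefix splice
lemma pvFold_eq (arr : List Int) (n : Int) (hn : n ≤ arr.length) :
    (PySem.List.pyRange 0 (n - 1) 1).foldl (fun acc i => pvDown acc i.toNat) arr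
      = PySem.List.sorted (arr.take n.toNat) (fun x => x) false ++ arr.drop n.toNat := by
  by_cases hpos : 1 ≤ n
  · obtain ⟨t, hperm, hpw, heq⟩ := pvOuter (n.toNat - 1) arr (by omega)
    have hk1 : n.toNat - 1 + 1 = n.toNat := by omega
    rw [hk1] at hperm heq
    have hr : PySem.List.pyRange 0 (n - 1) 1
        = (List.range (n.toNat - 1)).map (fun k : Nat => (k : Int)) := by
      rw [PySem.List.pyRange_one]
      rw [show (n - 1 - 0).toNat = n.toNat - 1 by omega]
      exact List.map_congr_left (fun k _ => by simp)
    rw [hr, List.foldl_map]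
    simp only [Int.toNat_natCast]
    rw [heq, PySem.List.sorted_id_eq_of_perm_of_pairwise _ _ hperm hpw]
  · have hr : PySem.List.pyRange 0 (n - 1) 1 = [] :=
      PySem.List.pyRange_one_eq_nil (by omega)
    have hm : n.toNat = 0 := by omega
    rw [hr, hm]
    simp only [List.foldl_nil, List.take_zero, List.drop_zero]
    rw [(PySem.List.sorted_eq_nil_iff _ _ _).mpr rfl]
    simp

-- B's slices written as take/drop
lemma pvAlt_eq (arr : List Int) (n : Int) :
    getSecondOrderElements_alt arr n =
      [PySem.List.pyGetD (PySem.List.sorted (arr.take n.toNat) (fun x => x) false ++ arr.drop n.toNat) (-2) 0,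
       PySem.List.pyGetD (PySem.List.sorted (arr.take n.toNat) (fun x => x) false ++ arr.drop n.toNat) 1 0] := by
  have hmax : max n 0 = ((n.toNat : Nat) : Int) := by omega
  show [PySem.List.pyGetD (PySem.List.sorted (PySem.List.slice arr none (some (max n 0))) (fun x => x) false
          ++ PySem.List.slice arr (some (max n 0)) none) (-2) 0,
        PySem.List.pyGetD (PySem.List.sorted (PySem.List.slice arr none (some (max n 0))) (fun x => x) false
          ++ PySem.List.slice arr (some (max n 0)) none) 1 0] = _
  rw [hmax, PySem.List.slice_to_natCast, PySem.List.slice_from_natCast]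

-- ===== VERDICT (by name: the statement is the Claim_ definition above) =====
theorem getSecondOrderElements_spec : Claim_equal_getSecondOrderElements := by
  intro arr n _ hpre
  obtain ⟨h2, hn⟩ := hpre
  unfold Spec_getSecondOrderElements getSecondOrderElements
  rw [pvAlt_eq, pvFold_eq arr n hn]
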